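-- pv_equiv track=rewrite | github.com/KEUMIN/algorithm_2024 | greedy/70130_R.py | solution
-- ===== SOURCE A (Python) =====
-- from collections import Counter
--
-- def solution(a):
--     N = len(a)
--     if N < 4:
--         return 0
--
--     freq = Counter(a)
--     best = 0
--
--     for v, cnt in freq.items():
--         if cnt * 2 <= best:
--             continue
--
--         # 내가 생각 못한 부분 - 시작
--         pairs = 0
--         i = 0
--         while i < N - 1:
--             # 같은 값끼리 붙은 구간은 쌍을 만들 수 없음
--             if a[i] == a[i + 1]:
--                 i += 1
--                 continue
--
--             # 서로 다른 인접한 두 값 중 하나가 v이면 유효 쌍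
--             if a[i] == v or a[i + 1] == v:
--                 pairs += 1
--                 i += 2  # 이 두 원소로 한 쌍을 사용
--             else:
--                 i += 1
--
--         best = max(best, pairs * 2)
--         # 내가 생각 못한 부분 - 끝
--
--     return best
-- ===== SOURCE B (Python) =====
-- def solution(a):
--     N = len(a)
--     if N < 4:
--         return 0
--     best = 0
--     for v in dict.fromkeys(a):
--         # right-to-left DP: d1/d2 = best matching of the suffix starting at i+1 / i+2
--         d1 = d2 = 0
--         for i in range(N - 2, -1, -1):
--             x, y = a[i], a[i + 1]
--             if x != y and (x == v or y == v):
--                 d1, d2 = max(d1, 1 + d2), d1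
--             else:
--                 d1, d2 = d1, d1
--         best = max(best, d1 * 2)
--     return best
-- ===== Notes on version B (the rewrite author's own statement) =====
-- stated objective: alternative
-- what changed: Replaces the per-value left-to-right greedy scan (with Counter counts and the cnt*2<=best pruning) by a per-value right-to-left two-cell dynamic program dp[i]=max(skip, take) over adjacent pairs, iterating plainly over the distinct values with no pruning.
import Mathlib
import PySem

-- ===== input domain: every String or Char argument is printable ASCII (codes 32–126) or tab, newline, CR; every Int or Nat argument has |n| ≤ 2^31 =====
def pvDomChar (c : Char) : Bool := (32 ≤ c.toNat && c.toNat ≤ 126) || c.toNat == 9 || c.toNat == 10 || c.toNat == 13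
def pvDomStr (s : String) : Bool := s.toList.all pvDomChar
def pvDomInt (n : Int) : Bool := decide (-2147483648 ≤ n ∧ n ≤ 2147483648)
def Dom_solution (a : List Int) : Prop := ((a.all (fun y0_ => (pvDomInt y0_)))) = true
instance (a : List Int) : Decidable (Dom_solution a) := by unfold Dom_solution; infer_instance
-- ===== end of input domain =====

-- B replaces A's per-value greedy scan by a per-value right-to-left DP over adjacent pairs
-- (alternative decomposition, same asymptotic cost); return values are proved equal on all inputs.

-- ===== PORT A =====
-- A's inner while-loop: i advances by 1 (skip) or 2 (pair taken); ported as the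
-- obvious recursion on the suffix of `a` starting at i, with the same state.
def greedyA (v : Int) : List Int → Int
  | x :: y :: rest =>
      if x == y then greedyA v (y :: rest)
      else if x == v || y == v then 1 + greedyA v rest
      else greedyA v (y :: rest)
  | _ => 0
  termination_by l => l.length
  decreasing_by all_goals simp

def solution (a : List Int) : Int :=
  if PySem.List.len a < 4 then 0
  else
    (PySem.Dict.counter a).items.foldl
      (fun best (p : Int × Int) =>
        if p.2 * 2 ≤ best then best
        else max best (greedyA p.1 a * 2)) 0

-- ===== PORT B =====
-- Source B's inner loop runs i = N-2 .. 0 over the adjacent pairs (a[i], a[i+1]) with state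
-- (d1, d2); ported exactly as a foldr over a.zip a.tail (same pairs, right to left).
def dpStep (v : Int) (xy : Int × Int) (d : Int × Int) : Int × Int :=
  if xy.1 ≠ xy.2 ∧ (xy.1 = v ∨ xy.2 = v) then (max d.1 (1 + d.2), d.1) else (d.1, d.1)

def solution_alt (a : List Int) : Int :=
  if PySem.List.len a < 4 then 0
  else
    (PySem.List.dedup a).foldl
      (fun best v => max best (((a.zip a.tail).foldr (dpStep v) (0, 0)).1 * 2)) 0

-- ===== PRECONDITION & SPEC =====
def Spec_solution (a : List Int) (out : Int) : Prop := out = solution_alt a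
instance (a : List Int) (out : Int) : Decidable (Spec_solution a out) := by unfold Spec_solution; infer_instance

-- ===== CLAIM (what is proved, stated in full; the proofs are below) =====
def Claim_equal_solution : Prop := ∀ (a : List Int), Dom_solution a → Spec_solution a (solution a)

-- ===== LEMMAS AND PROOFS =====

-- Optimal number of disjoint valid adjacent pairs (pairs of differing neighbours, one of them v).
def mOpt (v : Int) : List Int → Int
  | x :: y :: rest =>
      if x ≠ y ∧ (x = v ∨ y = v) then max (mOpt v (y :: rest)) (1 + mOpt v rest)
      else mOpt v (y :: rest)
  | _ => 0
  termination_by l => l.length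
  decreasing_by all_goals simp

theorem mOpt_cons_le (v x : Int) (l : List Int) : mOpt v l ≤ mOpt v (x :: l) := by
  cases l with
  | nil => simp [mOpt]
  | cons y rest =>
      rw [show mOpt v (x :: y :: rest)
            = if x ≠ y ∧ (x = v ∨ y = v) then max (mOpt v (y :: rest)) (1 + mOpt v rest)
              else mOpt v (y :: rest) from by rw [mOpt]]
      split_ifs with h
      · exact le_max_left _ _
      · exact le_refl _

theorem mOpt_le_one_add (v y : Int) (rest : List Int) :
    mOpt v (y :: rest) ≤ 1 + mOpt v rest := by
  cases rest with
  | nil => simp [mOpt]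
  | cons r0 rt =>
      rw [show mOpt v (y :: r0 :: rt)
            = if y ≠ r0 ∧ (y = v ∨ r0 = v) then max (mOpt v (r0 :: rt)) (1 + mOpt v rt)
              else mOpt v (r0 :: rt) from by rw [mOpt]]
      split_ifs with h
      · exact max_le (by linarith [mOpt_cons_le v y (r0 :: rt), mOpt_cons_le v r0 rt]) (by
          have := mOpt_cons_le v r0 rt
          omega)
      · omega

theorem greedyA_eq_mOpt (v : Int) (l : List Int) : greedyA v l = mOpt v l := by
  induction l using greedyA.induct v with
  | case1 x y rest h ih =>
      rw [show greedyA v (x :: y :: rest) = greedyA v (y :: rest) from by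
            simp [greedyA, h]]
      rw [show mOpt v (x :: y :: rest) = mOpt v (y :: rest) from by
            simp only [beq_iff_eq] at h
            simp [mOpt, h]]
      exact ih
  | case2 x y rest h1 h2 ih =>
      simp only [beq_iff_eq] at h1
      simp only [Bool.or_eq_true, beq_iff_eq] at h2
      rw [show greedyA v (x :: y :: rest) = 1 + greedyA v rest from by
            simp [greedyA, h1, h2]]
      rw [show mOpt v (x :: y :: rest) = max (mOpt v (y :: rest)) (1 + mOpt v rest) from by
            simp [mOpt, h1, h2]]
      rw [ih, max_eq_right (mOpt_le_one_add v y rest)]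
  | case3 x y rest h1 h2 ih =>
      simp only [beq_iff_eq] at h1
      simp only [Bool.or_eq_true, beq_iff_eq, not_or] at h2
      rw [show greedyA v (x :: y :: rest) = greedyA v (y :: rest) from by
            simp [greedyA, h1, h2]]
      rw [show mOpt v (x :: y :: rest) = mOpt v (y :: rest) from by
            simp [mOpt, h1, h2]]
      exact ih
  | case4 l h => cases l with
      | nil => simp [greedyA, mOpt]
      | cons x t => cases t with
          | nil => simp [greedyA, mOpt]
          | cons y rest => exact absurd rfl (h x y rest)

theorem greedyA_le_count (v : Int) (l : List Int) : greedyA v l ≤ (l.count v : Int) := by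
  induction l using greedyA.induct v with
  | case1 x y rest h ih =>
      rw [show greedyA v (x :: y :: rest) = greedyA v (y :: rest) from by simp [greedyA, h]]
      have hc : ((y :: rest).count v : Int) ≤ ((x :: y :: rest).count v : Int) := by
        simp [List.count_cons]; omega
      omega
  | case2 x y rest h1 h2 ih =>
      simp only [Bool.or_eq_true, beq_iff_eq] at h2
      rw [show greedyA v (x :: y :: rest) = 1 + greedyA v rest from by simp [greedyA, h1, h2]]
      have hc : (rest.count v : Int) + 1 ≤ ((x :: y :: rest).count v : Int) := by
        rcases h2 with h2 | h2 <;> subst h2 <;> simp [List.count_cons] <;> omega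
      omega
  | case3 x y rest h1 h2 ih =>
      rw [show greedyA v (x :: y :: rest) = greedyA v (y :: rest) from by simp [greedyA, h1, h2]]
      have hc : ((y :: rest).count v : Int) ≤ ((x :: y :: rest).count v : Int) := by
        simp [List.count_cons]; omega
      omega
  | case4 l h => cases l with
      | nil => simp [greedyA]
      | cons x t => cases t with
          | nil => simp [greedyA]
          | cons y rest => exact absurd rfl (h x y rest)

theorem dp_eq (v : Int) : ∀ a : List Int,
    (a.zip a.tail).foldr (dpStep v) (0, 0) = (mOpt v a, mOpt v a.tail)
  | [] => by simp [mOpt]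
  | [x] => by simp [mOpt]
  | x :: y :: rest => by
      have ih := dp_eq v (y :: rest)
      show dpStep v (x, y) (((y :: rest).zip (rest)).foldr (dpStep v) (0, 0)) = _
      rw [show ((y :: rest).zip rest) = ((y :: rest).zip (y :: rest).tail) from rfl, ih]
      rw [show mOpt v (x :: y :: rest)
            = if x ≠ y ∧ (x = v ∨ y = v) then max (mOpt v (y :: rest)) (1 + mOpt v rest)
              else mOpt v (y :: rest) from by rw [mOpt]]
      simp only [dpStep, List.tail_cons]
      split_ifs with h <;> rfl

-- ===== VERDICT (by name: the statement is the Claim_ definition above) =====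
theorem solution_spec : Claim_equal_solution := by
  intro a _
  show solution a = solution_alt a
  unfold solution solution_alt
  split_ifs with h
  · rfl
  · rw [PySem.Dict.items_counter, List.foldl_map, ← PySem.List.dedup_eq_ofList]
    congr 1
    funext best k
    simp only
    rw [dp_eq]
    dsimp only
    split_ifs with hle
    · have h1 := greedyA_le_count k a
      have h2 := greedyA_eq_mOpt k a
      omega
    · rw [greedyA_eq_mOpt]
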